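-- pv_equiv track=rewrite | github.com/LuminousDy/Texas_Holdem_WR_Calculator | utils/parallel.py | split_workload
-- ===== SOURCE A (Python) =====
-- def split_workload(total_items, num_workers):
--     """
--     Split workload evenly among workers.
--
--     Args:
--         total_items (int): Total number of items to process
--         num_workers (int): Number of workers
--
--     Returns:
--         list: List of (start, end) tuples for each worker
--     """
--     items_per_worker = total_items // num_workers
--     remaining = total_items % num_workers
--
--     workloads = []
--     start = 0
--
--     for i in range(num_workers):
--         extra = 1 if i < remaining else 0
--         end = start + items_per_worker + extra
--         workloads.append((start, end))
--         start = end
--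
--     return workloads
-- ===== SOURCE B (Python) =====
-- def split_workload(total_items, num_workers):
--     """Split workload evenly among workers (closed form per worker)."""
--     ipw = total_items // num_workers
--     remaining = total_items % num_workers
--     return [(i * ipw + min(i, remaining), (i + 1) * ipw + min(i + 1, remaining))
--             for i in range(num_workers)]
-- ===== Notes on version B (the rewrite author's own statement) =====
-- stated objective: alternative
-- what changed: Replaces the loop carrying a running `start` accumulator with a closed-form per-worker range: start_i = i*ipw + min(i, remaining), so each tuple is computed independently from i.
import Mathlib
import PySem

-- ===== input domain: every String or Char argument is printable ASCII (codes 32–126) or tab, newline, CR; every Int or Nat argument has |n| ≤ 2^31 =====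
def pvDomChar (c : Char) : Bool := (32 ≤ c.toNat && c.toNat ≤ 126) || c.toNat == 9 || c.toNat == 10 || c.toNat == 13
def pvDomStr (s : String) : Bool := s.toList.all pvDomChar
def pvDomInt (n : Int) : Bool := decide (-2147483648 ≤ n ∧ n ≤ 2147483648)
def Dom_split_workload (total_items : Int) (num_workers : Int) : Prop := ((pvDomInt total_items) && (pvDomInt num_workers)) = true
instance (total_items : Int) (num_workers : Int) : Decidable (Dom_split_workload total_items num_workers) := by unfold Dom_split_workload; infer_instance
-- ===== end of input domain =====

-- B replaces A's running-start accumulator with a closed-form per-worker range (alternative decomposition, same cost).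
-- Pre_ excludes num_workers = 0, on which A raises ZeroDivisionError.


-- ===== PORT A =====
def split_workload (total_items : Int) (num_workers : Int) : List (Int × Int) :=
  let items_per_worker := PySem.Int.floordiv total_items num_workers
  let remaining := PySem.Int.mod total_items num_workers
  let res := (PySem.List.pyRange 0 num_workers 1).foldl
    (fun (st : List (Int × Int) × Int) i =>
      let extra : Int := if i < remaining then 1 else 0
      let e := st.2 + items_per_worker + extra
      (st.1 ++ [(st.2, e)], e)) ([], 0)
  res.1

-- ===== PORT B =====
def split_workload_alt (total_items : Int) (num_workers : Int) : List (Int × Int) :=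
  let ipw := PySem.Int.floordiv total_items num_workers
  let remaining := PySem.Int.mod total_items num_workers
  (PySem.List.pyRange 0 num_workers 1).map
    (fun i => (i * ipw + min i remaining, (i + 1) * ipw + min (i + 1) remaining))

-- ===== PRECONDITION & SPEC =====
-- A raises ZeroDivisionError when num_workers = 0 (so does B); excluded.
def Pre_split_workload (total_items : Int) (num_workers : Int) : Prop := num_workers ≠ 0
instance (total_items : Int) (num_workers : Int) : Decidable (Pre_split_workload total_items num_workers) := by unfold Pre_split_workload; infer_instance
def pvWitness_split_workload : Int × Int := (10, 3)

def Spec_split_workload (total_items : Int) (num_workers : Int) (out : List (Int × Int)) : Prop := out = split_workload_alt total_items num_workers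
instance (total_items : Int) (num_workers : Int) (out : List (Int × Int)) : Decidable (Spec_split_workload total_items num_workers out) := by unfold Spec_split_workload; infer_instance

-- ===== CLAIM (what is proved, stated in full; the proofs are below) =====
def Claim_equal_split_workload : Prop := ∀ (total_items : Int) (num_workers : Int), Dom_split_workload total_items num_workers → Pre_split_workload total_items num_workers → Spec_split_workload total_items num_workers (split_workload total_items num_workers)

-- ===== LEMMAS AND PROOFS =====

-- Loop invariant: after folding the range [0, n), the accumulator is B's map of that
-- range together with the closed-form start n*ipw + min n remaining (needs 0 ≤ remaining).
theorem split_loop_closed (ipw remaining : Int) (hrem : 0 ≤ remaining) (n : Nat) :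
    (PySem.List.pyRange 0 (n : Int) 1).foldl
      (fun (st : List (Int × Int) × Int) i =>
        let extra : Int := if i < remaining then 1 else 0
        let e := st.2 + ipw + extra
        (st.1 ++ [(st.2, e)], e)) ([], 0)
    = ((PySem.List.pyRange 0 (n : Int) 1).map
        (fun i => (i * ipw + min i remaining, (i + 1) * ipw + min (i + 1) remaining)),
       (n : Int) * ipw + min (n : Int) remaining) := by
  induction n with
  | zero => simp [PySem.List.pyRange_one_eq_nil]; omega
  | succ k ih =>
    have h1 : (0 : Int) ≤ (k : Int) := by positivity
    have hrng : PySem.List.pyRange 0 ((k : Int) + 1) 1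
        = PySem.List.pyRange 0 (k : Int) 1 ++ [(k : Int)] :=
      PySem.List.pyRange_one_succ_right h1
    push_cast
    rw [hrng, List.foldl_append, ih, List.map_append]
    simp only [List.foldl_cons, List.foldl_nil, List.map_cons, List.map_nil]
    have hmin : min (k : Int) remaining + (if (k : Int) < remaining then 1 else 0)
        = min ((k : Int) + 1) remaining := by split_ifs <;> omega
    have hend : (k : Int) * ipw + min (k : Int) remaining + ipw
        + (if (k : Int) < remaining then 1 else 0)
        = ((k : Int) + 1) * ipw + min ((k : Int) + 1) remaining := by
      rw [← hmin]; ring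
    rw [hend]

theorem split_workload_eq (total_items num_workers : Int) (h : num_workers ≠ 0) :
    split_workload total_items num_workers = split_workload_alt total_items num_workers := by
  unfold split_workload split_workload_alt
  rcases lt_or_gt_of_ne h with hneg | hpos
  · rw [PySem.List.pyRange_one_eq_nil (by omega)]
    simp
  · have hrem : 0 ≤ PySem.Int.mod total_items num_workers :=
      PySem.Int.mod_nonneg total_items hpos
    obtain ⟨n, hn⟩ : ∃ n : Nat, num_workers = (n : Int) :=
      ⟨num_workers.toNat, by omega⟩
    subst hn
    simp only [split_loop_closed _ _ hrem n]

-- ===== VERDICT (by name: the statement is the Claim_ definition above) =====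
theorem split_workload_spec : Claim_equal_split_workload := by
  intro t n _ hpre
  exact split_workload_eq t n hpre
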